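-- pv_equiv track=rewrite | github.com/DanielSauve/AdventOfCode2020 | day6/day6.py | part_1
-- ===== SOURCE A (Python) =====
-- def part_1(questions: str) -> int:
--     yes_count = 0
--     for group in questions.split("\n\n"):
--         yes_list = set()
--         for person in group.split():
--             yes_list = yes_list.union(set(list(person)))
--         yes_count += len(yes_list)
--     return yes_count
-- ===== SOURCE B (Python) =====
-- def part_1(questions: str) -> int:
--     total = 0
--     for group in questions.split("\n\n"):
--         prev = None
--         for c in sorted("".join(group.split())):
--             if c != prev:
--                 total += 1
--                 prev = c
--     return total
-- ===== Notes on version B (the rewrite author's own statement) =====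
-- stated objective: alternative
-- what changed: B uses no sets at all: per group it sorts the flattened non-whitespace characters and counts distinct values by a single scan over adjacent positions (sort-then-scan) instead of A's incremental per-person set unions.
import Mathlib
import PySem

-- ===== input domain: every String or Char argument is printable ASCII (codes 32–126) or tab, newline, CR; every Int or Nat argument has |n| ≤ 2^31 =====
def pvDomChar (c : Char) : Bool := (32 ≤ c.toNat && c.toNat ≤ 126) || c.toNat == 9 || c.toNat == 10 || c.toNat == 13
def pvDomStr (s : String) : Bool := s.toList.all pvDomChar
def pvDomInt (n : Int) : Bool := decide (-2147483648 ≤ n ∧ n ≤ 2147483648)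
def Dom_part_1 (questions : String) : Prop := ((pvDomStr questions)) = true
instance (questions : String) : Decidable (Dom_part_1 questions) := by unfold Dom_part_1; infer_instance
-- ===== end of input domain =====

-- B counts each group's distinct characters by sorting the flattened characters and scanning
-- adjacent positions with a prev accumulator, instead of A's per-person set unions (objective: alternative).

-- ===== PORT A =====
def part_1 (questions : String) : Int :=
  ((PySem.Str.split? questions "\n\n").getD []).foldl
    (fun yes_count group =>
      let yes_list :=
        (PySem.Str.split₀ group).foldl
          (fun s person => PySem.Set.union s (PySem.Set.ofList person.toList))
          PySem.Set.empty
      yes_count + PySem.Set.len yes_list)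
    0

-- ===== PORT B =====
-- the body of B's inner loop: `if c != prev: total += 1; prev = c` on the state (total, prev)
def scanStep (st : Int × Option Char) (c : Char) : Int × Option Char :=
  if some c ≠ st.2 then (st.1 + 1, some c) else st

def part_1_alt (questions : String) : Int :=
  ((PySem.Str.split? questions "\n\n").getD []).foldl
    (fun total group =>
      ((PySem.List.sorted (PySem.Str.join "" (PySem.Str.split₀ group)).toList (fun c => c) false).foldl
        scanStep (total, none)).1)
    0

-- ===== PRECONDITION & SPEC =====
def Spec_part_1 (questions : String) (out : Int) : Prop := out = part_1_alt questions
instance (questions : String) (out : Int) : Decidable (Spec_part_1 questions out) := by unfold Spec_part_1; infer_instance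

-- ===== CLAIM (what is proved, stated in full; the proofs are below) =====
def Claim_equal_part_1 : Prop := ∀ (questions : String), Dom_part_1 questions → Spec_part_1 questions (part_1 questions)

-- ===== LEMMAS AND PROOFS =====

-- A's union loop over the persons builds the set of the flattened characters
lemma foldl_union_eq_update (ps : List String) (s : PySem.Set Char) :
    ps.foldl (fun s person => PySem.Set.union s (PySem.Set.ofList person.toList)) s
      = PySem.Set.update s (ps.map String.toList).flatten := by
  induction ps generalizing s with
  | nil => simp [PySem.Set.update_nil]
  | cons p ps ih =>
      simp only [List.foldl_cons, List.map_cons, List.flatten_cons, ih,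
        PySem.Set.update_append]
      congr 1
      simp [PySem.Set.union, PySem.Set.update_eq_append_filter, PySem.Set.ofList_ofList]

-- intercalating with the empty separator is flatten
lemma intercalate_nil_eq_flatten (xss : List (List Char)) : [].intercalate xss = xss.flatten := by
  induction xss with
  | nil => rfl
  | cons x xs ih => cases xs <;> simp_all [List.intercalate]

lemma join_empty_toList (ps : List String) :
    (PySem.Str.join "" ps).toList = (ps.map String.toList).flatten := by
  simp [PySem.Str.join, PySem.Chars.join, intercalate_nil_eq_flatten]

-- B's scan over a nondecreasing list, resumed after having just emitted p, adds the
-- number of distinct elements other than p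
lemma scan_some (l : List Char) (hl : l.Pairwise (· ≤ ·)) (p : Char)
    (hp : ∀ x ∈ l, p ≤ x) (t : Int) :
    (l.foldl scanStep (t, some p)).1 = t + ((l.toFinset.erase p).card : Int) := by
  induction l generalizing p t with
  | nil => simp
  | cons c rest ih =>
      have hpair := (List.pairwise_cons.mp hl)
      by_cases hcp : c = p
      · subst hcp
        have hstep : scanStep (t, some c) c = (t, some c) := by simp [scanStep]
        rw [List.foldl_cons, hstep, ih hpair.2 c hpair.1 t]
        congr 2
        rw [List.toFinset_cons, Finset.erase_insert_eq_erase]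
      · have hpc : p < c := lt_of_le_of_ne (hp c (by simp)) (Ne.symm hcp)
        have hstep : scanStep (t, some p) c = (t + 1, some c) := by simp [scanStep, hcp]
        rw [List.foldl_cons, hstep, ih hpair.2 c hpair.1 (t + 1)]
        have hpnot : p ∉ rest.toFinset := by
          intro hmem
          exact absurd (hpair.1 p (List.mem_toFinset.mp hmem)) (not_le.mpr hpc)
        have h1 : (c :: rest).toFinset.erase p = insert c rest.toFinset := by
          rw [List.toFinset_cons, Finset.erase_eq_of_notMem]
          simp [hpnot, Ne.symm hcp]
        have h2 : insert c rest.toFinset = insert c (rest.toFinset.erase c) := by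
          ext x; by_cases hx : x = c <;> simp [hx]
        rw [h1, h2, Finset.card_insert_of_notMem (Finset.notMem_erase c _)]
        push_cast
        ring

lemma scan_none (l : List Char) (hl : l.Pairwise (· ≤ ·)) (t : Int) :
    (l.foldl scanStep (t, none)).1 = t + (l.toFinset.card : Int) := by
  cases l with
  | nil => simp
  | cons c rest =>
      have hpair := (List.pairwise_cons.mp hl)
      have hstep : scanStep (t, none) c = (t + 1, some c) := by simp [scanStep]
      rw [List.foldl_cons, hstep, scan_some rest hpair.2 c hpair.1 (t + 1)]
      have hins : (c :: rest).toFinset = insert c (rest.toFinset.erase c) := by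
        rw [List.toFinset_cons]; ext x; by_cases hx : x = c <;> simp [hx]
      rw [hins, Finset.card_insert_of_notMem (Finset.notMem_erase c _)]
      push_cast
      ring

-- len(set(l)) is the toFinset card
lemma setLen_ofList (l : List Char) :
    PySem.Set.len (PySem.Set.ofList l) = (l.toFinset.card : Int) := by
  have hnd := PySem.Set.nodup_ofList (xs := l)
  have hfin : (PySem.Set.ofList l).toFinset = l.toFinset := by
    ext x
    simp [List.mem_toFinset, PySem.Set.mem_ofList]
  have := List.toFinset_card_of_nodup hnd
  simp [PySem.Set.len, ← this, hfin]

-- one group: A's accumulated count equals B's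
lemma group_count_eq (t : Int) (g : String) :
    t + PySem.Set.len
      ((PySem.Str.split₀ g).foldl
        (fun s person => PySem.Set.union s (PySem.Set.ofList person.toList)) PySem.Set.empty)
      = ((PySem.List.sorted (PySem.Str.join "" (PySem.Str.split₀ g)).toList (fun c => c) false).foldl
          scanStep (t, none)).1 := by
  have hA : (PySem.Str.split₀ g).foldl
      (fun s person => PySem.Set.union s (PySem.Set.ofList person.toList)) PySem.Set.empty
      = PySem.Set.ofList (PySem.Str.join "" (PySem.Str.split₀ g)).toList := by
    rw [foldl_union_eq_update, join_empty_toList]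
    rw [show PySem.Set.empty = ([] : PySem.Set Char) from rfl, PySem.Set.update_nil_left]
  have hsorted : (PySem.List.sorted (PySem.Str.join "" (PySem.Str.split₀ g)).toList
      (fun c => c) false).Pairwise (· ≤ ·) := by
    simpa using PySem.List.sorted_pairwise
      (xs := (PySem.Str.join "" (PySem.Str.split₀ g)).toList) (key := fun c => c)
  have hfin : (PySem.List.sorted (PySem.Str.join "" (PySem.Str.split₀ g)).toList
      (fun c => c) false).toFinset = (PySem.Str.join "" (PySem.Str.split₀ g)).toList.toFinset := by
    ext x
    rw [List.mem_toFinset, List.mem_toFinset, PySem.List.mem_sorted]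
  rw [hA, setLen_ofList, scan_none _ hsorted t, hfin]

-- the two outer folds agree from any starting accumulator
lemma folds_eq (gs : List String) (t : Int) :
    gs.foldl
      (fun yes_count group =>
        let yes_list :=
          (PySem.Str.split₀ group).foldl
            (fun s person => PySem.Set.union s (PySem.Set.ofList person.toList))
            PySem.Set.empty
        yes_count + PySem.Set.len yes_list) t
      = gs.foldl
        (fun total group =>
          ((PySem.List.sorted (PySem.Str.join "" (PySem.Str.split₀ group)).toList (fun c => c) false).foldl
            scanStep (total, none)).1) t := by
  induction gs generalizing t with
  | nil => rw [List.foldl_nil, List.foldl_nil]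
  | cons g gs ih =>
      rw [List.foldl_cons, List.foldl_cons, ih, group_count_eq t g]

-- ===== VERDICT (by name: the statement is the Claim_ definition above) =====
theorem part_1_spec : Claim_equal_part_1 := by
  intro questions _
  unfold Spec_part_1 part_1 part_1_alt
  exact folds_eq _ 0
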